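-- pv_equiv track=rewrite | github.com/rezwanul7/datastructures-and-algorithms | Array/remove_even_numbers.py | remove_even_numbers2
-- ===== SOURCE A (Python) =====
-- def remove_even_numbers2(numbers):
--     if len(numbers) == 0:
--         return []
--
--     index = 0
--     while index < len(numbers):
--         num = numbers[index]
--         if num % 2 == 0:
--             del numbers[index]
--         else:
--             index += 1
--
--     return numbers
-- ===== SOURCE B (Python) =====
-- def remove_even_numbers2(numbers):
--     if len(numbers) == 0:
--         return []
--
--     w = 0
--     for r in range(len(numbers)):
--         if numbers[r] % 2:
--             numbers[w] = numbers[r]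
--             w += 1
--     del numbers[w:]
--     return numbers
-- ===== Notes on version B (the rewrite author's own statement) =====
-- stated objective: faster
-- what changed: Replaces the while-loop that repeatedly deletes the current element (each del shifting the whole tail) with a single-pass two-pointer in-place compaction (write index over a read index, then one truncation), turning O(n^2) into O(n).
import Mathlib
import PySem

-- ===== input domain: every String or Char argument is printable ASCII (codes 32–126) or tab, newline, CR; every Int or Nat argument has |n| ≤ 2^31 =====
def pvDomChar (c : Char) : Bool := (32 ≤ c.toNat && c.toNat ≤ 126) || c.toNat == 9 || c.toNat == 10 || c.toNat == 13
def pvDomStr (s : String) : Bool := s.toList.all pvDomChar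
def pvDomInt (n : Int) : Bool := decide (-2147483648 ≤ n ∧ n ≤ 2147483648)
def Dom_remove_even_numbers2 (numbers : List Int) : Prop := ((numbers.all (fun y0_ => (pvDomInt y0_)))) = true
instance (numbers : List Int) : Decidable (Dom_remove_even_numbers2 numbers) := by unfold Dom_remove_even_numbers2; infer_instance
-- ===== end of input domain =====

-- B replaces A's repeated in-place `del` (quadratic) by a one-pass two-pointer compaction;
-- both mutate the argument list in Python — the equivalence proved here is about the return value.

-- ===== PORT A =====
-- while index < len(numbers): num = numbers[index]; if num % 2 == 0: del numbers[index] else index += 1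
-- (index is always in range when numbers[index] is read, so getD is exact here)
def pvLoopA (xs : List Int) (i : Nat) : List Int :=
  if h : i < xs.length then
    let num := xs.getD i 0
    if PySem.Int.mod num 2 == 0 then pvLoopA (xs.eraseIdx i) i
    else pvLoopA xs (i + 1)
  else xs
termination_by xs.length - i
decreasing_by
  · simp [List.length_eraseIdx, h]; omega
  · omega

def remove_even_numbers2 (numbers : List Int) : List Int :=
  if numbers.length == 0 then [] else pvLoopA numbers 0

-- ===== PORT B =====
-- for r in range(len(numbers)): if numbers[r] % 2: numbers[w] = numbers[r]; w += 1
-- (r is always in range when numbers[r] is read, so getD is exact here)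
def pvStepB (st : List Int × Nat) (r : Nat) : List Int × Nat :=
  let num := st.1.getD r 0
  if PySem.Int.mod num 2 != 0 then (st.1.set st.2 num, st.2 + 1) else st

def remove_even_numbers2_alt (numbers : List Int) : List Int :=
  if numbers.length == 0 then [] else
    let st := (List.range numbers.length).foldl pvStepB (numbers, 0)
    st.1.take st.2   -- del numbers[w:]

-- ===== PRECONDITION & SPEC =====
def Spec_remove_even_numbers2 (numbers : List Int) (out : List Int) : Prop := out = remove_even_numbers2_alt numbers
instance (numbers : List Int) (out : List Int) : Decidable (Spec_remove_even_numbers2 numbers out) := by unfold Spec_remove_even_numbers2; infer_instance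

-- ===== CLAIM (what is proved, stated in full; the proofs are below) =====
def Claim_equal_remove_even_numbers2 : Prop := ∀ (numbers : List Int), Dom_remove_even_numbers2 numbers → Spec_remove_even_numbers2 numbers (remove_even_numbers2 numbers)

-- ===== LEMMAS AND PROOFS =====

def pvOdd (n : Int) : Bool := PySem.Int.mod n 2 != 0

lemma pvOdd_false_of_even {x : Int} (h : (PySem.Int.mod x 2 == 0) = true) : pvOdd x = false := by
  simp only [pvOdd, bne, h, Bool.not_true]

lemma pvOdd_true_of_odd {x : Int} (h : (PySem.Int.mod x 2 == 0) = false) : pvOdd x = true := by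
  simp only [pvOdd, bne, h, Bool.not_false]

lemma pvLoopA_eq (xs : List Int) (i : Nat) :
    pvLoopA xs i = xs.take i ++ (xs.drop i).filter pvOdd := by
  induction xs, i using pvLoopA.induct with
  | case1 xs i h num heven ih =>
    rw [pvLoopA]
    simp only [h, dif_pos]
    rw [if_pos heven, ih]
    have hg : xs.getD i 0 = xs[i] := List.getD_eq_getElem xs 0 h
    have he : xs.eraseIdx i = xs.take i ++ xs.drop (i + 1) :=
      List.eraseIdx_eq_take_drop_succ xs i
    have hd : xs.drop i = xs[i] :: xs.drop (i + 1) := List.drop_eq_getElem_cons h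
    have hpt : (xs.take i).length = i := List.length_take_of_le (le_of_lt h)
    have hflt : (xs.drop i).filter pvOdd = (xs.drop (i + 1)).filter pvOdd := by
      have heven' : (PySem.Int.mod xs[i] 2 == 0) = true := by rw [← hg]; exact heven
      rw [hd, List.filter_cons_of_neg]
      simp [pvOdd_false_of_even heven']
    rw [he, hflt, List.take_append_of_le_length (by omega),
        List.drop_append_of_le_length (by omega)]
    rw [List.take_take, min_self, List.drop_take]
    have : i - i = 0 := by omega
    rw [this, List.take_zero, List.nil_append]
  | case2 xs i h num hodd ih =>
    rw [pvLoopA]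
    simp only [h, dif_pos]
    rw [if_neg hodd, ih]
    have hg : xs.getD i 0 = xs[i] := List.getD_eq_getElem xs 0 h
    have hd : xs.drop i = xs[i] :: xs.drop (i + 1) := List.drop_eq_getElem_cons h
    have ht : xs.take (i + 1) = xs.take i ++ [xs[i]] := List.take_succ_eq_append_getElem h
    have hodd' : (PySem.Int.mod xs[i] 2 == 0) = false := by
      rw [← hg]; exact Bool.eq_false_iff.mpr hodd
    rw [hd, List.filter_cons_of_pos (by simp [pvOdd_true_of_odd hodd']), ht,
        List.append_assoc, List.singleton_append]
  | case3 xs i h =>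
    rw [pvLoopA]
    simp only [h]
    rw [List.drop_eq_nil_of_le (by omega), List.take_of_length_le (by omega)]
    simp

lemma pvGetD_mid (F g D : List Int) (x : Int) :
    (F ++ g ++ x :: D).getD (F.length + g.length) 0 = x := by
  rw [List.append_assoc, List.getD_eq_getElem?_getD,
      List.getElem?_append_right (by omega)]
  have h1 : F.length + g.length - F.length = g.length := by omega
  rw [h1, List.getElem?_append_right (le_refl _), Nat.sub_self]
  simp

lemma pvSet_at_len (F rest : List Int) (v : Int) (h : rest ≠ []) :
    (F ++ rest).set F.length v = F ++ v :: rest.tail := by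
  induction F with
  | nil =>
    cases rest with
    | nil => exact absurd rfl h
    | cons y t => simp
  | cons a F' ih => simp [ih]

lemma pvSet_decomp (F g D : List Int) (x : Int) :
    F ++ x :: (g ++ x :: D).tail = (F ++ [x]) ++ (g ++ [x]).tail ++ D := by
  cases g with
  | nil => simp
  | cons g0 g' => simp

lemma pvFoldB (numbers : List Int) (r : Nat) (hr : r ≤ numbers.length) :
    ∃ g : List Int,
      (List.range r).foldl pvStepB (numbers, 0) =
        ((numbers.take r).filter pvOdd ++ g ++ numbers.drop r,
         ((numbers.take r).filter pvOdd).length) ∧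
      ((numbers.take r).filter pvOdd).length + g.length = r := by
  induction r with
  | zero => exact ⟨[], by simp, by simp⟩
  | succ r ih =>
    obtain ⟨g, hst, hlen⟩ := ih (by omega)
    have hrn : r < numbers.length := by omega
    have hd : numbers.drop r = numbers[r] :: numbers.drop (r + 1) :=
      List.drop_eq_getElem_cons hrn
    have ht : numbers.take (r + 1) = numbers.take r ++ [numbers[r]] :=
      List.take_succ_eq_append_getElem hrn
    set F := (numbers.take r).filter pvOdd with hF
    set x := numbers[r] with hx
    have hFr : (numbers.take (r + 1)).filter pvOdd =
        F ++ (if pvOdd x then [x] else []) := by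
      rw [ht, List.filter_append, ← hF]
      by_cases hpx : pvOdd x = true <;> simp [hpx]
    rw [List.range_succ, List.foldl_append, List.foldl_cons, List.foldl_nil, hst]
    have hget : (F ++ g ++ numbers.drop r).getD r 0 = x := by
      have h0 := pvGetD_mid F g (numbers.drop (r + 1)) x
      rw [hlen, ← hd] at h0
      exact h0
    by_cases hpx : pvOdd x = true
    · refine ⟨(g ++ [x]).tail, ?_, ?_⟩
      · show pvStepB (F ++ g ++ numbers.drop r, F.length) r = _
        unfold pvStepB
        simp only [hget]
        rw [show (PySem.Int.mod x 2 != 0) = pvOdd x from rfl, if_pos hpx]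
        have hne : g ++ numbers.drop r ≠ [] := by
          rw [hd]; exact List.append_ne_nil_of_right_ne_nil g (by simp)
        rw [List.append_assoc, pvSet_at_len _ _ _ hne]
        rw [hd, pvSet_decomp, hFr, if_pos hpx]
        simp
      · rw [hFr, if_pos hpx]
        have : (g ++ [x]).tail.length = g.length := by
          cases g <;> simp
        simp [this]; omega
    · refine ⟨g ++ [x], ?_, ?_⟩
      · show pvStepB (F ++ g ++ numbers.drop r, F.length) r = _
        unfold pvStepB
        simp only [hget]
        rw [show (PySem.Int.mod x 2 != 0) = pvOdd x from rfl, if_neg hpx, hFr, if_neg hpx, hd]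
        simp
      · rw [hFr, if_neg hpx]
        simp; omega

lemma remove_even_numbers2_alt_eq (numbers : List Int) :
    remove_even_numbers2_alt numbers = numbers.filter pvOdd := by
  unfold remove_even_numbers2_alt
  by_cases hnil : numbers.length == 0
  · have : numbers = [] := by simpa using hnil
    simp [this]
  · simp only [hnil, if_neg, Bool.false_eq_true, not_false_iff]
    obtain ⟨g, hst, hlen⟩ := pvFoldB numbers numbers.length (le_refl _)
    rw [hst]
    simp only [List.take_length, List.drop_length, List.append_nil]
    rw [List.take_append_of_le_length (le_refl _), List.take_length]

lemma remove_even_numbers2_eq (numbers : List Int) :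
    remove_even_numbers2 numbers = numbers.filter pvOdd := by
  unfold remove_even_numbers2
  by_cases hnil : numbers.length == 0
  · have : numbers = [] := by simpa using hnil
    simp [this]
  · simp only [hnil, if_neg, Bool.false_eq_true, not_false_iff]
    rw [pvLoopA_eq]
    simp

-- ===== VERDICT (by name: the statement is the Claim_ definition above) =====
theorem remove_even_numbers2_spec : Claim_equal_remove_even_numbers2 := by
  intro numbers _
  unfold Spec_remove_even_numbers2
  rw [remove_even_numbers2_eq, remove_even_numbers2_alt_eq]
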